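-- pv_equiv track=rewrite | github.com/yanyuhanyue/Git_Tool | Git_Tool_3.0.py | is_error_line
-- ===== SOURCE A (Python) =====
-- def is_error_line(line):
--     lower_line = line.lower()
--     error_patterns = [
--         "error:",
--         "fatal:",
--         "failed:",
--         "cannot ",
--         "unable to ",
--         "refusing to ",
--         "permission denied",
--         "authentication failed",
--     ]
--
--     return any(pattern in lower_line for pattern in error_patterns)
-- ===== SOURCE B (Python) =====
-- _ERROR_PATTERNS = (
--     "error:",
--     "fatal:",
--     "failed:",
--     "cannot ",
--     "unable to ",
--     "refusing to ",
--     "permission denied",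
--     "authentication failed",
-- )
--
-- def is_error_line(line):
--     s = line.lower()
--     for i in range(len(s)):
--         for p in _ERROR_PATTERNS:
--             if s.startswith(p, i):
--                 return True
--     return False
-- ===== Notes on version B (the rewrite author's own statement) =====
-- stated objective: alternative
-- what changed: B makes a single left-to-right pass over the lowercased line, testing at each position whether any of the eight patterns starts there, instead of A's eight separate full substring scans.
import Mathlib
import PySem

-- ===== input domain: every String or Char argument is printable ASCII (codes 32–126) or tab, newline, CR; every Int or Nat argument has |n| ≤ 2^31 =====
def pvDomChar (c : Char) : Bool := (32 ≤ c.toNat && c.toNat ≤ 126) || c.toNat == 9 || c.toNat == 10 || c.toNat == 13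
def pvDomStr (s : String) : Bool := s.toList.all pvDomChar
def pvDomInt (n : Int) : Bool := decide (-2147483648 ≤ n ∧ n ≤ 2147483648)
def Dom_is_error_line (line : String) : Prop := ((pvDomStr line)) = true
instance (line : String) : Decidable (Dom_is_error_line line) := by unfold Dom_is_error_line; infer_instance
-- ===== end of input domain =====

-- B replaces A's eight separate substring scans by one left-to-right pass that tests
-- every pattern at each position (objective: alternative single-pass formulation).

-- ===== PORT A =====
def pvPatternsA : List String :=
  ["error:", "fatal:", "failed:", "cannot ", "unable to ", "refusing to ",
   "permission denied", "authentication failed"]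

def is_error_line (line : String) : Bool :=
  let lower_line := PySem.Str.lower line
  pvPatternsA.any (fun pattern => PySem.Str.isIn pattern lower_line)

-- ===== PORT B =====
def pvPatternsB : List (List Char) :=
  ["error:".toList, "fatal:".toList, "failed:".toList, "cannot ".toList,
   "unable to ".toList, "refusing to ".toList,
   "permission denied".toList, "authentication failed".toList]

-- one pass: at each position, does some pattern start here?
def pvScan (cs : List Char) : Bool :=
  match cs with
  | [] => false
  | c :: rest => pvPatternsB.any (fun p => p.isPrefixOf (c :: rest)) || pvScan rest

def is_error_line_alt (line : String) : Bool :=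
  pvScan (PySem.Str.lower line).toList

-- ===== PRECONDITION & SPEC =====
def Spec_is_error_line (line : String) (out : Bool) : Prop := out = is_error_line_alt line
instance (line : String) (out : Bool) : Decidable (Spec_is_error_line line out) := by unfold Spec_is_error_line; infer_instance

-- ===== CLAIM (what is proved, stated in full; the proofs are below) =====
def Claim_equal_is_error_line : Prop := ∀ (line : String), Dom_is_error_line line → Spec_is_error_line line (is_error_line line)

-- ===== LEMMAS AND PROOFS =====

theorem pvPatternsB_eq : pvPatternsB = pvPatternsA.map String.toList := rfl

theorem pvScan_true_iff (cs : List Char) :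
    pvScan cs = true ↔ ∃ p ∈ pvPatternsB, ∃ j, p <+: cs.drop j := by
  induction cs with
  | nil => simp [pvScan, pvPatternsB]
  | cons c rest ih =>
    simp only [pvScan, Bool.or_eq_true, List.any_eq_true, ih]
    constructor
    · rintro (⟨p, hp, hpre⟩ | ⟨p, hp, j, hpre⟩)
      · exact ⟨p, hp, 0, by simpa using List.isPrefixOf_iff_prefix.mp hpre⟩
      · exact ⟨p, hp, j + 1, by simpa using hpre⟩
    · rintro ⟨p, hp, j, hpre⟩
      cases j with
      | zero => exact Or.inl ⟨p, hp, List.isPrefixOf_iff_prefix.mpr (by simpa using hpre)⟩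
      | succ j => exact Or.inr ⟨p, hp, j, by simpa using hpre⟩

-- ===== VERDICT (by name: the statement is the Claim_ definition above) =====
theorem is_error_line_spec : Claim_equal_is_error_line := by
  intro line _
  unfold Spec_is_error_line is_error_line is_error_line_alt
  rw [Bool.eq_iff_iff, pvScan_true_iff, pvPatternsB_eq]
  simp only [List.any_eq_true, List.mem_map]
  constructor
  · rintro ⟨p, hp, hin⟩
    refine ⟨p.toList, ⟨p, hp, rfl⟩, ?_⟩
    exact (PySem.Chars.exists_prefix_drop_iff_isIn _ _).mpr (by simpa using hin)
  · rintro ⟨q, ⟨p, hp, rfl⟩, hj⟩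
    refine ⟨p, hp, ?_⟩
    have := (PySem.Chars.exists_prefix_drop_iff_isIn _ _).mp hj
    simpa using this
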